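-- pv_equiv track=rewrite | github.com/Furkanahii/Rheo-MVP | Cmpe 150/Cmpe HW4/hw6/son.tester.py | sort_rows_border
-- ===== SOURCE A (Python) =====
-- def sort_rows_border(matris):
--     boy = len(matris)
--     for i in range(boy):
--         satir = matris[i]
--
--         # 1. Adim: Satiri 0 (border) olan yerlerden parcalara ayiralim
--         gruplar = []
--         gecici_grup = []
--
--         for eleman in satir:
--             if eleman == 0:
--                 if len(gecici_grup) > 0:
--                     gruplar.append(gecici_grup)
--                     gecici_grup = []
--                 gruplar.append("SINIR") # 0 gordugumuz yere isaret koyuyoruz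
--             else:
--                 gecici_grup.append(eleman)
--
--         if len(gecici_grup) > 0:
--             gruplar.append(gecici_grup)
--
--         # 2. Adim: Gruplari sirala ve birlestir
--         yeni_satir = []
--         for grup in gruplar:
--             if grup == "SINIR":
--                 yeni_satir.append(0)
--             else:
--                 grup.sort()
--                 yeni_satir.extend(grup)
--
--         matris[i] = yeni_satir
--
--     return matris
-- ===== SOURCE B (Python) =====
-- def sort_rows_border(matris):
--     for i in range(len(matris)):
--         row = matris[i]
--         # tag every nonzero value with the index of its zero-delimited segment
--         tagged = []
--         seg = 0
--         for v in row:
--             if v == 0: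
--                 seg += 1
--             else:
--                 tagged.append((seg, v))
--         # ONE global sort of the row's nonzero values, then a stable
--         # distribution into per-segment buckets: each bucket comes out sorted
--         tagged.sort(key=lambda t: t[1])
--         buckets = [[] for _ in range(seg + 1)]
--         for s, v in tagged:
--             buckets[s].append(v)
--         # rebuild the row positionally from the buckets
--         out = []
--         seg = 0
--         k = 0
--         for v in row:
--             if v == 0:
--                 out.append(0)
--                 seg += 1
--                 k = 0
--             else:
--                 out.append(buckets[seg][k])
--                 k += 1
--         matris[i] = out
--     return matris
-- ===== Notes on version B (the rewrite author's own statement) =====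
-- stated objective: alternative
-- what changed: B replaces A's split-into-segments-and-sort-each-group scheme by a radix-style one: it tags every nonzero value with its segment index, performs ONE stable sort of the whole row by value, distributes the sorted values into per-segment buckets (stability makes each bucket come out already sorted, no per-segment sort exists), and rebuilds the row positionally from the buckets.
import Mathlib
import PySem

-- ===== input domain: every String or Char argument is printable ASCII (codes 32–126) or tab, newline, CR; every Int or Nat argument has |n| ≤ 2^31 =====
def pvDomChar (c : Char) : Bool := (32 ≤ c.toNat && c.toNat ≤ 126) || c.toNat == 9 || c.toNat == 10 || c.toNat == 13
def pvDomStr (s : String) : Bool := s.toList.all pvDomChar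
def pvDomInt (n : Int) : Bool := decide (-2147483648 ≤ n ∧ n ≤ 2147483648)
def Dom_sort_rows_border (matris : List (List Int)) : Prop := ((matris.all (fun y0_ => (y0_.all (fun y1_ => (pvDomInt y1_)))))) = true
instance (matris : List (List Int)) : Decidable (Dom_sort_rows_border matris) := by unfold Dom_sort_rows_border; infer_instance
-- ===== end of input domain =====

-- B replaces A's split-into-segments-and-sort-each scheme by a radix-style one: tag each nonzero
-- value with its segment index, do ONE stable sort of the whole row by value, distribute the
-- sorted values into per-segment buckets (stability makes every bucket come out sorted), and
-- rebuild the row positionally. Both Pythons rebind matris[i] in place; equivalence is about the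
-- return value.

-- ===== PORT A =====
-- A's heterogeneous `gruplar` list (int-lists mixed with the string "SINIR") is encoded as
-- List (Option (List Int)): `some g` is a group, `none` is the "SINIR" marker.
def pvStepA (st : List (Option (List Int)) × List Int) (eleman : Int) :
    List (Option (List Int)) × List Int :=
  if eleman = 0 then
    ((if st.2.length > 0 then st.1 ++ [some st.2] else st.1) ++ [none], [])
  else
    (st.1, st.2 ++ [eleman])

def pvRowA (satir : List Int) : List Int :=
  let st := satir.foldl pvStepA ([], [])
  let gruplar := if st.2.length > 0 then st.1 ++ [some st.2] else st.1
  gruplar.foldl (fun yeni grup =>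
    match grup with
    | none => yeni ++ [0]
    | some g => yeni ++ PySem.List.sorted g (fun x => x) false) []

def sort_rows_border (matris : List (List Int)) : List (List Int) :=
  matris.map pvRowA

-- ===== PORT B =====
-- 'for v in row: if v == 0: seg += 1 else: tagged.append((seg, v))'
def pvTagStep (st : Nat × List (Nat × Int)) (v : Int) : Nat × List (Nat × Int) :=
  if v = 0 then (st.1 + 1, st.2) else (st.1, st.2 ++ [(st.1, v)])

-- 'for s, v in tagged: buckets[s].append(v)'
def pvDistStep (bs : List (List Int)) (t : Nat × Int) : List (List Int) :=
  bs.set t.1 (bs.getD t.1 [] ++ [t.2])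

-- 'for v in row: …' rebuild; buckets[seg][k] is always in range, getD 0 totalizes it
def pvEmitStep (bs : List (List Int)) (st : List Int × Nat × Nat) (v : Int) :
    List Int × Nat × Nat :=
  if v = 0 then (st.1 ++ [0], st.2.1 + 1, 0)
  else (st.1 ++ [(bs.getD st.2.1 []).getD st.2.2 0], st.2.1, st.2.2 + 1)

def pvRowB (row : List Int) : List Int :=
  let tg := row.foldl pvTagStep (0, [])
  let u := PySem.List.sorted tg.2 (fun t => t.2) false
  let buckets := u.foldl pvDistStep (List.replicate (tg.1 + 1) [])
  (row.foldl (pvEmitStep buckets) ([], 0, 0)).1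

def sort_rows_border_alt (matris : List (List Int)) : List (List Int) :=
  matris.map pvRowB

-- ===== PRECONDITION & SPEC =====
def Spec_sort_rows_border (matris : List (List Int)) (out : List (List Int)) : Prop := out = sort_rows_border_alt matris
instance (matris : List (List Int)) (out : List (List Int)) : Decidable (Spec_sort_rows_border matris out) := by unfold Spec_sort_rows_border; infer_instance

-- ===== CLAIM (what is proved, stated in full; the proofs are below) =====
def Claim_equal_sort_rows_border : Prop := ∀ (matris : List (List Int)), Dom_sort_rows_border matris → Spec_sort_rows_border matris (sort_rows_border matris)

-- ===== LEMMAS AND PROOFS =====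

def pvSortI (l : List Int) : List Int := PySem.List.sorted l (fun x => x) false

-- reference row transform: sort the zero-free prefix, keep the first zero, recurse
def pvSpecRow (r : List Int) : List Int :=
  let rest := r.dropWhile (fun x => x != 0)
  if h : rest = [] then pvSortI r
  else pvSortI (r.takeWhile (fun x => x != 0)) ++ 0 :: pvSpecRow rest.tail
termination_by r.length
decreasing_by
  have h1 : (r.dropWhile (fun x => x != 0)).length ≤ r.length := List.length_dropWhile_le _ _
  have h2 : 0 < (r.dropWhile (fun x => x != 0)).length := List.length_pos_of_ne_nil h
  simp only [List.length_tail]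
  omega

theorem pvSpecRow_eq (r : List Int) :
    pvSpecRow r =
      if h : r.dropWhile (fun x => x != 0) = [] then pvSortI r
      else pvSortI (r.takeWhile (fun x => x != 0)) ++
        0 :: pvSpecRow (r.dropWhile (fun x => x != 0)).tail := by
  rw [pvSpecRow]


def pvRender (gs : List (Option (List Int))) : List Int :=
  gs.foldl (fun yeni grup =>
    match grup with
    | none => yeni ++ [0]
    | some g => yeni ++ PySem.List.sorted g (fun x => x) false) []

theorem pvRender_append (gs : List (Option (List Int))) (x : Option (List Int)) :
    pvRender (gs ++ [x]) = pvRender gs ++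
      (match x with
       | none => [0]
       | some g => PySem.List.sorted g (fun x => x) false) := by
  cases x <;> simp [pvRender, List.foldl_append]

theorem pvRender_flush (gs : List (Option (List Int))) (t : List Int) :
    pvRender ((if t.length > 0 then gs ++ [some t] else gs)) =
      pvRender gs ++ pvSortI t := by
  cases t with
  | nil => simp [pvSortI]; rfl
  | cons a t' => simp [pvRender_append, pvSortI]

theorem pvFoldA_zero_free (l : List Int) (g : List (Option (List Int))) (b : List Int)
    (hl : ∀ x ∈ l, x ≠ 0) : l.foldl pvStepA (g, b) = (g, b ++ l) := by
  induction l generalizing b with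
  | nil => simp
  | cons v l ih =>
    have hv : v ≠ 0 := hl v (by simp)
    simp only [List.foldl_cons, pvStepA, if_neg hv]
    rw [ih _ (fun x hx => hl x (by simp [hx]))]
    simp

def pvRunA (g : List (Option (List Int))) (r : List Int) : List Int :=
  let st := r.foldl pvStepA (g, [])
  pvRender (if st.2.length > 0 then st.1 ++ [some st.2] else st.1)

theorem pvDropWhile_head {p : Int → Bool} :
    ∀ (l : List Int) (y : Int) (ys : List Int), l.dropWhile p = y :: ys → p y = false := by
  intro l
  induction l with
  | nil => intro y ys h; simp [List.dropWhile] at h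
  | cons a l ih =>
    intro y ys h
    by_cases ha : p a
    · rw [List.dropWhile_cons_of_pos ha] at h; exact ih y ys h
    · rw [List.dropWhile_cons_of_neg ha] at h
      cases h; simpa using ha

theorem pvRunA_eq (n : Nat) : ∀ (r : List Int), r.length ≤ n →
    ∀ (g : List (Option (List Int))), pvRunA g r = pvRender g ++ pvSpecRow r := by
  induction n with
  | zero =>
    intro r hr g
    have : r = [] := List.eq_nil_of_length_eq_zero (Nat.le_zero.mp hr)
    subst this
    rw [pvSpecRow_eq]
    simp [pvRunA, pvRender, pvSortI]
    rfl
  | succ n ih =>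
    intro r hr g
    have hsplit := (List.takeWhile_append_dropWhile (p := fun x => x != 0) (l := r)).symm
    have hpre : ∀ x ∈ r.takeWhile (fun x => x != 0), x ≠ 0 := by
      intro x hx
      have := List.mem_takeWhile_imp hx
      simpa using this
    cases hdw : r.dropWhile (fun x => x != 0) with
    | nil =>
      have hall : ∀ x ∈ r, x ≠ 0 := by
        intro x hx
        rw [hsplit, hdw] at hx
        exact hpre x (by simpa using hx)
      rw [pvSpecRow_eq, dif_pos hdw]
      unfold pvRunA
      rw [pvFoldA_zero_free r g [] hall]
      simpa using pvRender_flush g r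
    | cons d rs =>
      have hd0 : d = 0 := by
        have := pvDropWhile_head r d rs hdw
        simpa using this
      subst hd0
      rw [pvSpecRow_eq, dif_neg (by simp [hdw])]
      unfold pvRunA
      conv_lhs => rw [hsplit, hdw]
      rw [List.foldl_append, pvFoldA_zero_free _ g [] hpre]
      simp only [List.foldl_cons]
      have hstep : pvStepA (g, [] ++ r.takeWhile (fun x => x != 0)) 0 =
          ((if (r.takeWhile (fun x => x != 0)).length > 0
             then g ++ [some (r.takeWhile (fun x => x != 0))] else g) ++ [none], []) := by
        simp [pvStepA]
      rw [hstep]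
      have hlen : rs.length ≤ n := by
        have h1 : (r.dropWhile (fun x => x != 0)).length ≤ r.length := List.length_dropWhile_le _ _
        rw [hdw] at h1; simp at h1; omega
      have := ih rs hlen ((if (r.takeWhile (fun x => x != 0)).length > 0
             then g ++ [some (r.takeWhile (fun x => x != 0))] else g) ++ [none])
      unfold pvRunA at this
      rw [this, pvRender_append, pvRender_flush]
      simp [hdw]

theorem pvRowA_eq_spec (r : List Int) : pvRowA r = pvSpecRow r := by
  have := pvRunA_eq r.length r (le_refl _) []
  unfold pvRunA at this
  simpa [pvRowA, pvRender, pvSortI] using this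


-- ---- B side ----

-- reference tagging of a row's nonzero values with segment indices starting at s
def pvT (s : Nat) : List Int → List (Nat × Int)
  | [] => []
  | v :: r => if v = 0 then pvT (s + 1) r else (s, v) :: pvT s r

theorem pvFoldTag (r : List Int) : ∀ (s : Nat) (b : List (Nat × Int)),
    r.foldl pvTagStep (s, b) = (s + r.count 0, b ++ pvT s r) := by
  induction r with
  | nil => intro s b; simp [pvT]
  | cons v r ih =>
    intro s b
    by_cases hv : v = 0
    · subst hv
      simp only [List.foldl_cons, pvTagStep, if_pos rfl, pvT]
      rw [ih]
      simp [List.count_cons]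
      omega
    · simp only [List.foldl_cons, pvTagStep, if_neg hv, pvT]
      rw [ih]
      simp [List.count_cons, hv]

theorem pvT_lb (r : List Int) : ∀ (s : Nat) (t : Nat × Int), t ∈ pvT s r → s ≤ t.1 := by
  induction r with
  | nil => intro s t ht; simp [pvT] at ht
  | cons v r ih =>
    intro s t ht
    by_cases hv : v = 0
    · rw [pvT, if_pos hv] at ht
      have := ih (s + 1) t ht; omega
    · rw [pvT, if_neg hv] at ht
      rcases List.mem_cons.mp ht with h | h
      · subst h; simp
      · exact ih s t h

theorem pvT_ub (r : List Int) : ∀ (s : Nat) (t : Nat × Int), t ∈ pvT s r → t.1 < s + r.count 0 + 1 := by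
  induction r with
  | nil => intro s t ht; simp [pvT] at ht
  | cons v r ih =>
    intro s t ht
    by_cases hv : v = 0
    · rw [pvT, if_pos hv] at ht
      have := ih (s + 1) t ht
      subst hv
      have hc : (0 :: r).count (0 : Int) = r.count 0 + 1 := by simp
      omega
    · rw [pvT, if_neg hv] at ht
      have hc : (v :: r).count 0 = r.count 0 := by simp [List.count_cons, hv]
      rcases List.mem_cons.mp ht with h | h
      · subst h
        show s < s + (v :: r).count 0 + 1
        omega
      · have := ih s t h; omega

theorem pvT_zero_free (l : List Int) (s : Nat) (hl : ∀ x ∈ l, x ≠ 0) :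
    pvT s l = l.map (fun v => (s, v)) := by
  induction l with
  | nil => simp [pvT]
  | cons v l ih =>
    have hv : v ≠ 0 := hl v (by simp)
    rw [pvT, if_neg hv, ih (fun x hx => hl x (by simp [hx]))]
    simp

theorem pvT_split (pre : List Int) (rs : List Int) (s : Nat) (hpre : ∀ x ∈ pre, x ≠ 0) :
    pvT s (pre ++ 0 :: rs) = pre.map (fun v => (s, v)) ++ pvT (s + 1) rs := by
  induction pre with
  | nil => simp [pvT]
  | cons v pre ih =>
    have hv : v ≠ 0 := hpre v (by simp)
    simp only [List.cons_append, pvT, if_neg hv]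
    rw [ih (fun x hx => hpre x (by simp [hx]))]
    simp

-- ---- stability of PySem.List.sorted under filtering ----

theorem pvInsFront {α : Type} (key : α → Int) (x : α) (l : List α)
    (h : ∀ y ∈ l, key x < key y) :
    PySem.List.insertBy (fun a b => decide (key a < key b)) x l = x :: l := by
  cases l with
  | nil => rw [PySem.List.insertBy.eq_1]
  | cons y ys =>
    rw [PySem.List.insertBy.eq_2, if_pos (by simpa using h y (by simp))]

theorem pvFilterIns {α : Type} (key : α → Int) (p : α → Bool) (x : α) (l : List α)
    (hl : l.Pairwise (fun a b => key a ≤ key b)) :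
    (PySem.List.insertBy (fun a b => decide (key a < key b)) x l).filter p =
      if p x then PySem.List.insertBy (fun a b => decide (key a < key b)) x (l.filter p)
      else l.filter p := by
  induction l with
  | nil =>
    by_cases hp : p x <;> simp [hp, PySem.List.insertBy.eq_1]
  | cons y ys ih =>
    have hyl : ∀ z ∈ ys, key y ≤ key z := (List.pairwise_cons.mp hl).1
    have hys : ys.Pairwise (fun a b => key a ≤ key b) := (List.pairwise_cons.mp hl).2
    rw [PySem.List.insertBy.eq_2]
    by_cases hxy : key x < key y
    · rw [if_pos (by simpa using hxy)]
      by_cases hpx : p x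
      · by_cases hpy : p y
        · simp [List.filter_cons, hpx, hpy, PySem.List.insertBy.eq_2, hxy]
        · have hfront : ∀ z ∈ ys.filter p, key x < key z := by
            intro z hz
            have := hyl z (List.mem_of_mem_filter hz)
            omega
          rw [if_pos hpx, List.filter_cons_of_neg hpy, pvInsFront key x _ hfront]
          simp [List.filter_cons, hpx, hpy]
      · rw [if_neg hpx]
        simp [List.filter_cons, hpx]
    · rw [if_neg (by simpa using hxy)]
      by_cases hpy : p y
      · rw [List.filter_cons_of_pos hpy, ih hys, List.filter_cons_of_pos hpy]
        by_cases hpx : p x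
        · rw [if_pos hpx, if_pos hpx, PySem.List.insertBy.eq_2, if_neg (by simpa using hxy)]
        · rw [if_neg hpx, if_neg hpx]
      · rw [List.filter_cons_of_neg hpy, ih hys, List.filter_cons_of_neg hpy]

theorem pvFoldFilter {α : Type} (key : α → Int) (p : α → Bool) (xs : List α) :
    ∀ (acc : List α), acc.Pairwise (fun a b => key a ≤ key b) →
    (xs.foldl (fun acc x => PySem.List.insertBy (fun a b => decide (key a < key b)) x acc) acc).filter p
      = (xs.filter p).foldl (fun acc x => PySem.List.insertBy (fun a b => decide (key a < key b)) x acc) (acc.filter p) := by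
  induction xs with
  | nil => intro acc _; simp
  | cons x xs ih =>
    intro acc hacc
    simp only [List.foldl_cons]
    rw [ih _ (PySem.List.insertBy_pairwise_le key x acc hacc), pvFilterIns key p x acc hacc,
      List.filter_cons]
    by_cases hpx : p x <;> simp [hpx]

theorem pvFilterSorted {α : Type} (key : α → Int) (p : α → Bool) (xs : List α) :
    (PySem.List.sorted xs key false).filter p = PySem.List.sorted (xs.filter p) key false := by
  rw [PySem.List.sorted_eq_foldl_insertBy, PySem.List.sorted_eq_foldl_insertBy]
  simpa using pvFoldFilter key p xs [] (by simp)

-- ---- map snd commutes with sorting by snd ----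

theorem pvInsMap (t : Nat × Int) (l : List (Nat × Int)) :
    (PySem.List.insertBy (fun a b => decide (a.2 < b.2)) t l).map Prod.snd =
      PySem.List.insertBy (fun a b => decide (a < b)) t.2 (l.map Prod.snd) := by
  induction l with
  | nil => rw [PySem.List.insertBy.eq_1]; simp [PySem.List.insertBy.eq_1]
  | cons y ys ih =>
    rw [PySem.List.insertBy.eq_2, List.map_cons, PySem.List.insertBy.eq_2]
    by_cases h : t.2 < y.2
    · rw [if_pos (by simpa using h), if_pos (by simpa using h)]; simp
    · rw [if_neg (by simpa using h), if_neg (by simpa using h)]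
      simp [ih]

theorem pvMapSnd (q : List (Nat × Int)) :
    (PySem.List.sorted q (fun t => t.2) false).map Prod.snd =
      PySem.List.sorted (q.map Prod.snd) (fun x => x) false := by
  rw [PySem.List.sorted_eq_foldl_insertBy, PySem.List.sorted_eq_foldl_insertBy]
  suffices h : ∀ (acc : List (Nat × Int)),
      (q.foldl (fun acc x => PySem.List.insertBy (fun a b => decide (a.2 < b.2)) x acc) acc).map Prod.snd
        = (q.map Prod.snd).foldl (fun acc x => PySem.List.insertBy (fun a b => decide (a < b)) x acc) (acc.map Prod.snd) by
    simpa using h []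
  induction q with
  | nil => intro acc; simp
  | cons x xs ih =>
    intro acc
    simp only [List.foldl_cons, List.map_cons]
    rw [ih, pvInsMap]

-- ---- bucket distribution ----

theorem pvDistChar (u : List (Nat × Int)) : ∀ (bs : List (List Int)) (j : Nat),
    (∀ t ∈ u, t.1 < bs.length) →
    (u.foldl pvDistStep bs).getD j [] =
      bs.getD j [] ++ (u.filter (fun t => t.1 == j)).map Prod.snd := by
  induction u with
  | nil => intro bs j _; simp
  | cons t u ih =>
    intro bs j hu
    have ht : t.1 < bs.length := hu t (by simp)
    simp only [List.foldl_cons]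
    rw [ih _ j (by intro z hz; simpa [pvDistStep] using hu z (by simp [hz]))]
    by_cases hj : t.1 = j
    · subst hj
      have : (pvDistStep bs t).getD t.1 [] = bs.getD t.1 [] ++ [t.2] := by
        simp [pvDistStep, List.getD_eq_getElem?_getD, List.getElem?_set_self ht,
          List.getElem?_eq_getElem ht]
      rw [this, List.filter_cons_of_pos (by simp)]
      simp
    · have : (pvDistStep bs t).getD j [] = bs.getD j [] := by
        simp [pvDistStep, List.getD_eq_getElem?_getD, List.getElem?_set_ne hj]
      rw [this, List.filter_cons_of_neg (by simpa using hj)]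

-- ---- positional rebuild ----

theorem pvEmit_zero_free (bs : List (List Int)) (l : List Int) :
    ∀ (out : List Int) (s k : Nat), (∀ x ∈ l, x ≠ 0) →
    l.foldl (pvEmitStep bs) (out, s, k) =
      (out ++ (List.range l.length).map (fun i => (bs.getD s []).getD (k + i) 0), s, k + l.length) := by
  induction l with
  | nil => intro out s k _; simp
  | cons v l ih =>
    intro out s k hl
    have hv : v ≠ 0 := hl v (by simp)
    simp only [List.foldl_cons, pvEmitStep, if_neg hv]
    rw [ih _ s (k + 1) (fun x hx => hl x (by simp [hx]))]
    simp only [List.length_cons, Prod.mk.injEq]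
    refine ⟨?_, trivial, by omega⟩
    rw [List.range_succ_eq_map, List.map_cons, List.map_map, List.append_assoc,
      List.singleton_append]
    congr 1
    congr 1
    apply List.map_congr_left
    intro i _
    have hk : k + 1 + i = k + Nat.succ i := by omega
    simp [Function.comp_def, hk]

theorem pvRangeGetD (b : List Int) :
    (List.range b.length).map (fun i => b.getD i 0) = b := by
  apply List.ext_getElem
  · simp
  · intro i h1 h2
    simp [List.getD_eq_getElem?_getD, List.getElem?_eq_getElem h2]


theorem pvFilterSelfTag (l : List Int) (s : Nat) :
    (l.map (fun v => (s, v))).filter (fun t => t.1 == s) = l.map (fun v => (s, v)) := by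
  apply List.filter_eq_self.mpr
  intro a ha
  rcases List.mem_map.mp ha with ⟨v, _, rfl⟩
  simp

theorem pvFilterNeTag (l : List Int) (s j : Nat) (h : j ≠ s) :
    (l.map (fun v => (s, v))).filter (fun t => t.1 == j) = [] := by
  apply List.filter_eq_nil_iff.mpr
  intro a ha
  rcases List.mem_map.mp ha with ⟨v, _, rfl⟩
  simp [Ne.symm h]

theorem pvFilterLowTag (rs : List Int) (s j : Nat) (h : j ≤ s) :
    (pvT (s + 1) rs).filter (fun t => t.1 == j) = [] := by
  apply List.filter_eq_nil_iff.mpr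
  intro t ht
  have := pvT_lb rs (s + 1) t ht
  simp only [beq_iff_eq]
  omega

theorem pvEmitBucket (bs : List (List Int)) (l : List Int) (out : List Int) (s : Nat)
    (hl : ∀ x ∈ l, x ≠ 0) (hb : bs.getD s [] = pvSortI l) :
    l.foldl (pvEmitStep bs) (out, s, 0) = (out ++ pvSortI l, s, l.length) := by
  rw [pvEmit_zero_free bs l out s 0 hl]
  have hlen : (bs.getD s []).length = l.length := by
    rw [hb]; exact PySem.List.length_sorted l (fun x => x) false
  have : (List.range l.length).map (fun i => (bs.getD s []).getD (0 + i) 0) = bs.getD s [] := by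
    simp only [Nat.zero_add]
    rw [← hlen]
    exact pvRangeGetD _
  rw [this, hb]
  simp

theorem pvRebuild (n : Nat) : ∀ (r : List Int), r.length ≤ n →
    ∀ (s : Nat) (bs : List (List Int)) (out : List Int),
    (∀ j : Nat, bs.getD (s + j) [] = pvSortI (((pvT s r).filter (fun t => t.1 == s + j)).map Prod.snd)) →
    (r.foldl (pvEmitStep bs) (out, s, 0)).1 = out ++ pvSpecRow r := by
  induction n with
  | zero =>
    intro r hr s bs out _
    have : r = [] := List.eq_nil_of_length_eq_zero (Nat.le_zero.mp hr)
    subst this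
    rw [pvSpecRow_eq]
    simp [pvSortI]
    rfl
  | succ n ih =>
    intro r hr s bs out hbs
    have hsplit := (List.takeWhile_append_dropWhile (p := fun x => x != 0) (l := r)).symm
    have hpre : ∀ x ∈ r.takeWhile (fun x => x != 0), x ≠ 0 := by
      intro x hx
      have := List.mem_takeWhile_imp hx
      simpa using this
    cases hdw : r.dropWhile (fun x => x != 0) with
    | nil =>
      have hall : ∀ x ∈ r, x ≠ 0 := by
        intro x hx
        rw [hsplit, hdw] at hx
        exact hpre x (by simpa using hx)
      have hT : pvT s r = r.map (fun v => (s, v)) := pvT_zero_free r s hall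
      have hb : bs.getD s [] = pvSortI r := by
        have := hbs 0
        rw [hT] at this
        simpa [pvFilterSelfTag] using this
      rw [pvSpecRow_eq, dif_pos hdw, pvEmitBucket bs r out s hall hb]
    | cons d rs =>
      have hd0 : d = 0 := by
        have := pvDropWhile_head r d rs hdw
        simpa using this
      subst hd0
      have hr' : r = r.takeWhile (fun x => x != 0) ++ 0 :: rs := by
        conv_lhs => rw [hsplit]
        rw [hdw]
      have hT : pvT s r = (r.takeWhile (fun x => x != 0)).map (fun v => (s, v)) ++ pvT (s + 1) rs := by
        conv_lhs => rw [hr']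
        exact pvT_split _ rs s hpre
      have hb : bs.getD s [] = pvSortI (r.takeWhile (fun x => x != 0)) := by
        have := hbs 0
        rw [hT] at this
        simpa [List.filter_append, pvFilterSelfTag, pvFilterLowTag rs s s (le_refl s)] using this
      conv_lhs => rw [hr']
      rw [List.foldl_append, pvEmitBucket bs _ out s hpre hb]
      simp only [List.foldl_cons, pvEmitStep, if_pos, if_true]
      have hlen : rs.length ≤ n := by
        have h1 : (r.dropWhile (fun x => x != 0)).length ≤ r.length := List.length_dropWhile_le _ _
        rw [hdw] at h1; simp at h1; omega
      have hbs' : ∀ j : Nat, bs.getD (s + 1 + j) [] =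
          pvSortI (((pvT (s + 1) rs).filter (fun t => t.1 == s + 1 + j)).map Prod.snd) := by
        intro j
        have := hbs (1 + j)
        rw [hT] at this
        have harith : s + (1 + j) = s + 1 + j := by omega
        rw [harith] at this
        rw [this]
        congr 1
        rw [List.filter_append, pvFilterNeTag _ s (s + 1 + j) (by omega)]
        simp
      rw [ih rs hlen (s + 1) bs _ hbs']
      rw [pvSpecRow_eq (r := r), dif_neg (by simp [hdw]), hdw]
      simp

theorem pvReplicateGetD (n j : Nat) : (List.replicate n ([] : List Int)).getD j [] = [] := by
  simp [List.getD_eq_getElem?_getD, List.getElem?_replicate]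
  split <;> simp

theorem pvRowB_eq_spec (r : List Int) : pvRowB r = pvSpecRow r := by
  have hmem : ∀ t ∈ PySem.List.sorted (pvT 0 r) (fun t : Nat × Int => t.2) false,
      t.1 < (List.replicate (r.count 0 + 1) ([] : List Int)).length := by
    intro t ht
    have ht' : t ∈ pvT 0 r := (PySem.List.mem_sorted _ _ _ _).mp ht
    have := pvT_ub r 0 t ht'
    simp
    omega
  have hH : ∀ j : Nat,
      ((PySem.List.sorted (pvT 0 r) (fun t : Nat × Int => t.2) false).foldl pvDistStep
        (List.replicate (r.count 0 + 1) [])).getD (0 + j) []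
        = pvSortI (((pvT 0 r).filter (fun t => t.1 == 0 + j)).map Prod.snd) := by
    intro j
    rw [pvDistChar _ _ (0 + j) hmem, pvReplicateGetD, List.nil_append,
      pvFilterSorted (fun t : Nat × Int => t.2) (fun t => t.1 == 0 + j) (pvT 0 r), pvMapSnd]
    rfl
  have hrb := pvRebuild r.length r (le_refl _) 0 _ [] hH
  simpa [pvRowB, pvFoldTag] using hrb

-- ===== VERDICT (by name: the statement is the Claim_ definition above) =====
theorem sort_rows_border_spec : Claim_equal_sort_rows_border := by
  intro matris _
  unfold Spec_sort_rows_border sort_rows_border sort_rows_border_alt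
  simp [pvRowA_eq_spec, pvRowB_eq_spec]
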